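-- pv_equiv track=rewrite | github.com/a112168/ATP2025 | TPC7/tpc07.py | produtoM3
-- ===== SOURCE A (Python) =====
-- def produtoM3(lista):
--     menor1, menor2, menor3 = sorted(lista[:3]) #inicia no 0 e para no 2
--    #inicia os 3 menores com os 3 primeiros
--     for n in lista[3:]: #percorre o resto da lista(dps desses3)
--         if n<menor1:
--             menor3=menor2
--             menor2=menor1
--             menor1=n
--         elif n<menor2: #passamos para aqui caso o n seja maior que o menor1
--             menor3=menor2
--             menor2=n
--         elif n<menor3:
--             menor3=n
--
--     return menor1*menor2*menor3
-- ===== SOURCE B (Python) =====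
-- def produtoM3(lista):
--     s = sorted(lista)
--     a, b, c = s[:3]
--     return a * b * c
-- ===== Notes on version B (the rewrite author's own statement) =====
-- stated objective: simpler
-- what changed: A keeps three running minima updated by a branch cascade over the tail; B sorts the whole list once and multiplies the first three elements (slice-unpacking preserves the ValueError on lists shorter than 3).
import Mathlib
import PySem

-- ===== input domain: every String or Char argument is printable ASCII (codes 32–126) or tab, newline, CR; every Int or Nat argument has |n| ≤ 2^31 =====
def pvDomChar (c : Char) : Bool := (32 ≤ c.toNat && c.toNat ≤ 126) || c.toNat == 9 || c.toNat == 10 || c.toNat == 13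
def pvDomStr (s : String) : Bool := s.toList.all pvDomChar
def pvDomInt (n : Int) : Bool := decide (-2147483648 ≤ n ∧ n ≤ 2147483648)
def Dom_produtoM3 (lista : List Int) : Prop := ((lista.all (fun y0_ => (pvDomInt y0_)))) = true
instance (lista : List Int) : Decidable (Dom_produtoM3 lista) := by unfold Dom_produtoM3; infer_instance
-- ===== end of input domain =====

-- B replaces A's running-three-minima branch cascade with sort-then-take-first-three (objective: simpler).


-- ===== PORT A =====
-- the loop body: the if/elif/elif cascade updating (menor1, menor2, menor3)
def pvStep (t : Int × Int × Int) (n : Int) : Int × Int × Int :=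
  let (m1, m2, m3) := t
  if n < m1 then (n, m1, m2)
  else if n < m2 then (m1, n, m2)
  else if n < m3 then (m1, m2, n)
  else (m1, m2, m3)

def produtoM3 (lista : List Int) : Int :=
  -- menor1, menor2, menor3 = sorted(lista[:3])  — unpacking raises ValueError unless exactly 3 items (excluded by Pre_)
  match PySem.List.sorted (PySem.List.slice lista none (some 3)) (fun x => x) false with
  | [m1, m2, m3] =>
      let r := (PySem.List.slice lista (some 3) none).foldl pvStep (m1, m2, m3)
      r.1 * r.2.1 * r.2.2
  | _ => 0

-- ===== PORT B =====
def produtoM3_alt (lista : List Int) : Int :=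
  let s := PySem.List.sorted lista (fun x => x) false
  -- a, b, c = s[:3]  — unpacking raises ValueError unless exactly 3 items (excluded by Pre_)
  match PySem.List.slice s none (some 3) with
  | [] => 0          -- ValueError (excluded by Pre_)
  | [_] => 0         -- ValueError (excluded by Pre_)
  | [_, _] => 0      -- ValueError (excluded by Pre_)
  | a :: b :: c :: _ => a * b * c   -- the slice never has more than 3 elements

-- ===== PRECONDITION & SPEC =====
-- lists with fewer than 3 elements make both Pythons raise ValueError (tuple unpacking)
def Pre_produtoM3 (lista : List Int) : Prop := 3 ≤ lista.length
instance (lista : List Int) : Decidable (Pre_produtoM3 lista) := by unfold Pre_produtoM3; infer_instance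
def pvWitness_produtoM3 : List Int := [5, 1, 4, 2]

def Spec_produtoM3 (lista : List Int) (out : Int) : Prop := out = produtoM3_alt lista
instance (lista : List Int) (out : Int) : Decidable (Spec_produtoM3 lista out) := by unfold Spec_produtoM3; infer_instance

-- ===== CLAIM (what is proved, stated in full; the proofs are below) =====
def Claim_equal_produtoM3 : Prop := ∀ (lista : List Int), Dom_produtoM3 lista → Pre_produtoM3 lista → Spec_produtoM3 lista (produtoM3 lista)

-- ===== LEMMAS AND PROOFS =====

-- abbreviation used only in the proofs
def pvSrt (xs : List Int) : List Int := PySem.List.sorted xs (fun x => x) false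

lemma pvSlice_to_three (xs : List Int) : PySem.List.slice xs none (some 3) = xs.take 3 := by
  have h := PySem.List.slice_to_natCast xs 3
  simpa using h

lemma pvSlice_from_three (xs : List Int) : PySem.List.slice xs (some 3) none = xs.drop 3 := by
  have h := PySem.List.slice_from_natCast xs 3
  simpa using h

lemma pvSrt_perm (xs : List Int) : (pvSrt xs).Perm xs := PySem.List.sorted_perm xs _ _

lemma pvSrt_pairwise (xs : List Int) : (pvSrt xs).Pairwise (· ≤ ·) := by
  have h := PySem.List.sorted_pairwise xs (fun x : Int => x)
  simpa [pvSrt] using h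

lemma pvSrt_congr {xs ys : List Int} (h : xs.Perm ys) : pvSrt xs = pvSrt ys := by
  unfold pvSrt
  exact PySem.List.sorted_eq_sorted_of_perm xs ys (fun x => x) (fun a b hab => hab) h

-- CORE: appending one element ≥ the current three minima does not change the first three of the sort
lemma pvTake3_big (a b c d : Int) (l : List Int) (h1 : a ≤ b) (h2 : b ≤ c) (h3 : c ≤ d) :
    (pvSrt (a :: b :: c :: d :: l)).take 3 = (pvSrt (a :: b :: c :: l)).take 3 := by
  have hperm : (pvSrt (a :: b :: c :: l)).Perm (a :: b :: c :: l) := pvSrt_perm _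
  have hpw : (pvSrt (a :: b :: c :: l)).Pairwise (· ≤ ·) := pvSrt_pairwise _
  have hlen : (pvSrt (a :: b :: c :: l)).length = l.length + 3 := by
    simpa using hperm.length_eq
  obtain ⟨s0, s1, s2, rest, hs⟩ :
      ∃ s0 s1 s2 rest, pvSrt (a :: b :: c :: l) = s0 :: s1 :: s2 :: rest := by
    cases hS : pvSrt (a :: b :: c :: l) with
    | nil => rw [hS] at hlen; simp at hlen
    | cons s0 t =>
      cases t with
      | nil => rw [hS] at hlen; simp at hlen
      | cons s1 t2 =>
        cases t2 with
        | nil => rw [hS] at hlen; simp at hlen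
        | cons s2 rest => exact ⟨s0, s1, s2, rest, rfl⟩
  rw [hs] at hperm hpw
  have h01 : s0 ≤ s1 := by
    have := List.pairwise_cons.mp hpw
    exact this.1 s1 (by simp)
  have h12 : s1 ≤ s2 := by
    have := List.pairwise_cons.mp (List.pairwise_cons.mp hpw).2
    exact this.1 s2 (by simp)
  have h2rest : ∀ x ∈ rest, s2 ≤ x := by
    have := List.pairwise_cons.mp (List.pairwise_cons.mp (List.pairwise_cons.mp hpw).2).2
    exact this.1
  have hrestpw : rest.Pairwise (· ≤ ·) :=
    (List.pairwise_cons.mp (List.pairwise_cons.mp (List.pairwise_cons.mp hpw).2).2).2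
  -- the third smallest is at most c
  have hs2c : s2 ≤ c := by
    by_contra hgt
    push Not at hgt
    have hcnt := hperm.countP_eq (fun x => decide (x ≤ c))
    have hac : a ≤ c := h1.trans h2
    have hrest0 : List.countP (fun x => decide (x ≤ c)) rest = 0 := by
      rw [List.countP_eq_zero]
      intro x hx
      have := h2rest x hx
      simp only [decide_eq_true_eq]
      omega
    simp only [List.countP_cons, hrest0, decide_eq_true_eq] at hcnt
    by_cases e0 : s0 ≤ c <;> by_cases e1 : s1 ≤ c <;>
      simp [e0, e1, hac, h2, hgt.not_ge] at hcnt
  have hs2d : s2 ≤ d := hs2c.trans h3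
  -- the sorted big list is s0 :: s1 :: s2 :: (d inserted into rest)
  set t := List.orderedInsert (· ≤ ·) d rest with ht
  have htperm : t.Perm (d :: rest) := List.perm_orderedInsert _ d rest
  have htmem : ∀ x ∈ t, s2 ≤ x := by
    intro x hx
    rcases (List.mem_orderedInsert _).mp hx with h | h
    · exact h ▸ hs2d
    · exact h2rest x h
  have htpw : t.Pairwise (· ≤ ·) := List.Pairwise.orderedInsert d rest hrestpw
  have hbig : pvSrt (a :: b :: c :: d :: l) = s0 :: s1 :: s2 :: t := by
    have p1 : (s0 :: s1 :: s2 :: t).Perm (s0 :: s1 :: s2 :: d :: rest) :=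
      ((htperm.cons s2).cons s1).cons s0
    have p2 : (s0 :: s1 :: s2 :: d :: rest).Perm (d :: s0 :: s1 :: s2 :: rest) :=
      List.perm_middle (l₁ := [s0, s1, s2])
    have p3 : (d :: s0 :: s1 :: s2 :: rest).Perm (d :: a :: b :: c :: l) := hperm.cons d
    have p4 : (a :: b :: c :: d :: l).Perm (d :: a :: b :: c :: l) :=
      List.perm_middle (l₁ := [a, b, c])
    have ppw : (s0 :: s1 :: s2 :: t).Pairwise (· ≤ ·) := by
      refine List.pairwise_cons.mpr ⟨?_, List.pairwise_cons.mpr ⟨?_, List.pairwise_cons.mpr ⟨htmem, htpw⟩⟩⟩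
      · intro x hx
        simp only [List.mem_cons] at hx
        rcases hx with rfl | rfl | hx
        · exact h01
        · exact h01.trans h12
        · exact (h01.trans h12).trans (htmem x hx)
      · intro x hx
        simp only [List.mem_cons] at hx
        rcases hx with rfl | hx
        · exact h12
        · exact h12.trans (htmem x hx)
    exact PySem.List.sorted_id_eq_of_perm_of_pairwise _ _ (((p1.trans p2).trans p3).trans p4.symm) ppw
  rw [hbig, hs]
  simp

-- first three elements of a list, as a triple (junk on shorter lists; only used on lists of length ≥ 3)
def pvTriple (xs : List Int) : Int × Int × Int :=
  match xs with
  | x :: y :: z :: _ => (x, y, z)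
  | _ => (0, 0, 0)

-- loop invariant: the running triple is the sorted three smallest of everything seen
lemma pvInv (l : List Int) : ∀ a b c : Int, a ≤ b → b ≤ c →
    l.foldl pvStep (a, b, c) = pvTriple ((pvSrt (a :: b :: c :: l)).take 3) := by
  induction l with
  | nil =>
    intro a b c h1 h2
    have hpw : ([a, b, c] : List Int).Pairwise (fun x y => x ≤ y) := by
      refine List.pairwise_cons.mpr ⟨?_, List.pairwise_cons.mpr ⟨?_, by simp⟩⟩ <;>
        · intro x hx
          simp only [List.mem_cons, List.not_mem_nil, or_false] at hx
          rcases hx with rfl | rfl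
          all_goals omega
    have hself : pvSrt [a, b, c] = [a, b, c] :=
      PySem.List.sorted_eq_self_of_pairwise [a, b, c] (fun x => x) hpw
    simp [hself, pvTriple]
  | cons n l ih =>
    intro a b c h1 h2
    have key : ∀ a' b' c' dd : Int, a' ≤ b' → b' ≤ c' → c' ≤ dd →
        (a' :: b' :: c' :: dd :: l).Perm (a :: b :: c :: n :: l) →
        List.foldl pvStep (a', b', c') l = pvTriple ((pvSrt (a :: b :: c :: n :: l)).take 3) := by
      intro a' b' c' dd ha hb hc hp
      rw [ih a' b' c' ha hb, ← pvTake3_big a' b' c' dd l ha hb hc, pvSrt_congr hp]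
    show List.foldl pvStep (pvStep (a, b, c) n) l = _
    simp only [pvStep]
    split_ifs with hn1 hn2 hn3
    · exact key n a b c (le_of_lt hn1) h1 h2 (List.perm_middle (l₁ := [a, b, c])).symm
    · exact key a n b c (by omega) (le_of_lt hn2) h2
        ((List.perm_middle (l₁ := [b, c])).symm.cons a)
    · exact key a b n c h1 (by omega) (le_of_lt hn3)
        ((List.Perm.swap c n l).cons b |>.cons a)
    · exact key a b c n h1 h2 (by omega) (List.Perm.refl _)

-- ===== VERDICT (by name: the statement is the Claim_ definition above) =====
theorem produtoM3_spec : Claim_equal_produtoM3 := by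
  unfold Claim_equal_produtoM3 Spec_produtoM3 Pre_produtoM3
  intro lista _ hpre
  obtain ⟨x, y, z, l, rfl⟩ : ∃ x y z l, lista = x :: y :: z :: l := by
    match lista, hpre with
    | x :: y :: z :: l, _ => exact ⟨x, y, z, l, rfl⟩
  -- the sorted first three
  have hlen3 : (pvSrt [x, y, z]).length = 3 := by
    simpa using (pvSrt_perm [x, y, z]).length_eq
  obtain ⟨m1, m2, m3, hm⟩ : ∃ m1 m2 m3, pvSrt [x, y, z] = [m1, m2, m3] := by
    match hS : pvSrt [x, y, z], hlen3 with
    | [m1, m2, m3], _ => exact ⟨m1, m2, m3, rfl⟩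
  have hmp : ([m1, m2, m3] : List Int).Pairwise (· ≤ ·) := hm ▸ pvSrt_pairwise [x, y, z]
  have h12 : m1 ≤ m2 := by
    have := List.pairwise_cons.mp hmp
    exact this.1 m2 (by simp)
  have h23 : m2 ≤ m3 := by
    have := List.pairwise_cons.mp (List.pairwise_cons.mp hmp).2
    exact this.1 m3 (by simp)
  have hmperm : (m1 :: m2 :: m3 :: l).Perm (x :: y :: z :: l) :=
    ((hm ▸ pvSrt_perm [x, y, z]).append_right l : ([m1, m2, m3] ++ l).Perm ([x, y, z] ++ l))
  -- reduce port A
  have hA : produtoM3 (x :: y :: z :: l) =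
      (pvTriple ((pvSrt (x :: y :: z :: l)).take 3)).1 *
      (pvTriple ((pvSrt (x :: y :: z :: l)).take 3)).2.1 *
      (pvTriple ((pvSrt (x :: y :: z :: l)).take 3)).2.2 := by
    unfold produtoM3
    rw [pvSlice_to_three, pvSlice_from_three]
    show (match pvSrt [x, y, z] with
      | [m1, m2, m3] =>
          let r := List.foldl pvStep (m1, m2, m3) l
          r.1 * r.2.1 * r.2.2
      | _ => 0) = _
    rw [hm]
    simp only []
    rw [pvInv l m1 m2 m3 h12 h23, pvSrt_congr hmperm]
  -- reduce port B
  have hlenB : (pvSrt (x :: y :: z :: l)).length = l.length + 3 := by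
    simpa using (pvSrt_perm (x :: y :: z :: l)).length_eq
  obtain ⟨t0, t1, t2, trest, hT⟩ :
      ∃ t0 t1 t2 trest, pvSrt (x :: y :: z :: l) = t0 :: t1 :: t2 :: trest := by
    match hS : pvSrt (x :: y :: z :: l), hlenB with
    | t0 :: t1 :: t2 :: trest, _ => exact ⟨t0, t1, t2, trest, rfl⟩
  have hB : produtoM3_alt (x :: y :: z :: l) = t0 * t1 * t2 := by
    unfold produtoM3_alt
    simp only []
    rw [pvSlice_to_three]
    show (match (pvSrt (x :: y :: z :: l)).take 3 with
      | [] => 0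
      | [_] => 0
      | [_, _] => 0
      | a :: b :: c :: _ => a * b * c) = t0 * t1 * t2
    rw [hT]
    rfl
  rw [hA, hB, hT]
  rfl
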